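-- pv_equiv track=rewrite | github.com/paiml/depyler | examples/hard_edge_dict_group.py | group_by_sign
-- ===== SOURCE A (Python) =====
-- def group_by_sign(arr: list[int]) -> dict[int, list[int]]:
--     """Group elements as negative (key -1), zero (key 0), positive (key 1)."""
--     groups: dict[int, list[int]] = {}
--     groups[0 - 1] = []
--     groups[0] = []
--     groups[1] = []
--     i: int = 0
--     while i < len(arr):
--         val: int = arr[i]
--         if val < 0:
--             groups[0 - 1].append(val)
--         elif val == 0:
--             groups[0].append(val)
--         else:
--             groups[1].append(val)
--         i = i + 1
--     return groups
-- ===== SOURCE B (Python) =====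
-- def group_by_sign(arr: list[int]) -> dict[int, list[int]]:
--     """Group elements as negative (key -1), zero (key 0), positive (key 1)."""
--     return {
--         -1: [x for x in arr if x < 0],
--         0: [x for x in arr if x == 0],
--         1: [x for x in arr if x > 0],
--     }
-- ===== Notes on version B (the rewrite author's own statement) =====
-- stated objective: idiomatic
-- what changed: Replaces the index-driven while loop that dispatches each element into a mutable dict with a dict literal built from three independent filtering comprehensions, one per fixed key.
import Mathlib
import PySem

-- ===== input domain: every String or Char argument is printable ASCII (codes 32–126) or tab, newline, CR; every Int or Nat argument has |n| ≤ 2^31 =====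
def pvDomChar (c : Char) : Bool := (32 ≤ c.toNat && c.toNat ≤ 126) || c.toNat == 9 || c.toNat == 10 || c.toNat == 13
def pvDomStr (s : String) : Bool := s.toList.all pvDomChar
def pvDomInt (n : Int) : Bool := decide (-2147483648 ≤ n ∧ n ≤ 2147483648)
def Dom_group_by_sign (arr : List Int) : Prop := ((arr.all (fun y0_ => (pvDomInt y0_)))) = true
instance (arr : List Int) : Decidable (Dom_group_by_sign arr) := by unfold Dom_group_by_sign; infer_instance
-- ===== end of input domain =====

-- B replaces A's index-driven single-pass dispatch into a mutable dict by a dict literal of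
-- three independent filtering comprehensions (objective: idiomatic).


-- ===== PORT A =====
-- literal port of A: three insertions of empty groups, then the while loop over indices
-- becomes a fold over arr (i strictly advances over arr), each step appending to the
-- selected key's list via Dict.modify (key always present, so the default [] is unused).
def group_by_sign (arr : List Int) : List (Int × List Int) :=
  let groups : PySem.Dict Int (List Int) := PySem.Dict.empty
  let groups := groups.insert (0 - 1) []
  let groups := groups.insert 0 []
  let groups := groups.insert 1 []
  let groups := arr.foldl (fun groups val =>
    if val < 0 then groups.modify (0 - 1) [] (· ++ [val])
    else if val == 0 then groups.modify 0 [] (· ++ [val])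
    else groups.modify 1 [] (· ++ [val])) groups
  groups.items

-- ===== PORT B =====
-- literal port of B: a dict literal with the three distinct fixed keys, each mapped to a
-- filtering comprehension over arr.
def group_by_sign_alt (arr : List Int) : List (Int × List Int) :=
  (PySem.Dict.mk [(-1, arr.filter (fun x => x < 0)),
                  (0, arr.filter (fun x => x == 0)),
                  (1, arr.filter (fun x => 0 < x))]).items

-- ===== PRECONDITION & SPEC =====
def Spec_group_by_sign (arr : List Int) (out : List (Int × List Int)) : Prop := out = group_by_sign_alt arr
instance (arr : List Int) (out : List (Int × List Int)) : Decidable (Spec_group_by_sign arr out) := by unfold Spec_group_by_sign; infer_instance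

-- ===== CLAIM =====
def Claim_equal_group_by_sign : Prop := ∀ (arr : List Int), Dom_group_by_sign arr → Spec_group_by_sign arr (group_by_sign arr)

-- ===== LEMMAS AND PROOFS =====

-- loop invariant: folding A's step over arr starting from the three-key dict appends the
-- corresponding filters of arr to each group.
theorem group_loop_invariant (arr : List Int) : ∀ (n z p : List Int),
    (arr.foldl (fun groups val =>
      if val < 0 then groups.modify (0 - 1) [] (· ++ [val])
      else if val == 0 then groups.modify 0 [] (· ++ [val])
      else groups.modify 1 [] (· ++ [val]))
      (PySem.Dict.mk [(-1, n), (0, z), (1, p)])).items =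
    [(-1, n ++ arr.filter (fun x => x < 0)),
     (0, z ++ arr.filter (fun x => x == 0)),
     (1, p ++ arr.filter (fun x => 0 < x))] := by
  induction arr with
  | nil => intro n z p; simp
  | cons x t ih =>
    intro n z p
    simp only [List.foldl_cons, List.filter_cons]
    rcases lt_trichotomy x 0 with h | h | h
    · rw [if_pos h,
        show (PySem.Dict.mk [((-1 : Int), n), (0, z), (1, p)]).modify (0-1) [] (· ++ [x])
           = PySem.Dict.mk [(-1, n ++ [x]), (0, z), (1, p)] from rfl,
        ih]
      simp [h, show ¬ x == 0 by simp [h.ne], show ¬ 0 < x by omega]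
    · subst h
      rw [if_neg (by omega : ¬ (0:Int) < 0), if_pos (by decide : ((0:Int) == 0) = true),
        show (PySem.Dict.mk [((-1 : Int), n), (0, z), (1, p)]).modify 0 [] (· ++ [(0:Int)])
           = PySem.Dict.mk [(-1, n), (0, z ++ [0]), (1, p)] from rfl,
        ih]
      simp
    · rw [if_neg (by omega : ¬ x < 0), if_neg (by simp [h.ne'] : ¬ (x == 0) = true),
        show (PySem.Dict.mk [((-1 : Int), n), (0, z), (1, p)]).modify 1 [] (· ++ [x])
           = PySem.Dict.mk [(-1, n), (0, z), (1, p ++ [x])] from rfl,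
        ih]
      simp [h, show ¬ x < 0 by omega, show ¬ x == 0 by simp [h.ne']]

-- ===== VERDICT =====
theorem group_by_sign_spec : Claim_equal_group_by_sign := by
  intro arr _
  show (arr.foldl (fun groups val =>
      if val < 0 then groups.modify (0 - 1) [] (· ++ [val])
      else if val == 0 then groups.modify 0 [] (· ++ [val])
      else groups.modify 1 [] (· ++ [val]))
      (PySem.Dict.mk [(-1, []), (0, []), (1, [])])).items = group_by_sign_alt arr
  rw [group_loop_invariant]
  rfl
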